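-- pv_equiv track=rewrite | github.com/wenchaozhang-123/profile | gpMgmt/bin/gpdirtableload.py | splitPgpassLine
-- ===== SOURCE A (Python) =====
-- def splitPgpassLine(a):
--     """
--     If the user has specified a .pgpass file, we'll have to parse it. We simply
--     split the string into arrays at :. We could just use a native python
--     function but we need to escape the ':' character.
--     """
--     b = []
--     escape = False
--     d = ''
--     for c in a:
--         if not escape and c == '\\':
--             escape = True
--         elif not escape and c == ':':
--             b.append(d)
--             d = ''
--         else:
--             d += c
--             escape = False
--     if escape:
--         d += '\\'
--     b.append(d)
--     return b
-- ===== SOURCE B (Python) =====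
-- def splitPgpassLine(a):
--     # Split on backslash first (native split), then stitch the escaped
--     # segments back together, splitting each unescaped stretch on ':'.
--     segs = a.split('\\')
--     parts = segs[0].split(':')
--     i = 1
--     n = len(segs)
--     while i < n:
--         seg = segs[i]
--         if seg == '':
--             if i + 1 < n:
--                 # '\\\\' in the input: a literal backslash, next segment unescaped
--                 sub = segs[i + 1].split(':')
--                 parts[-1] += '\\' + sub[0]
--                 parts.extend(sub[1:])
--                 i += 2
--             else:
--                 # line ends with a lone backslash: kept literally
--                 parts[-1] += '\\'
--                 i += 1
--         else:
--             # first char of the segment is escaped, the rest splits on ':'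
--             sub = seg[1:].split(':')
--             parts[-1] += seg[0] + sub[0]
--             parts.extend(sub[1:])
--             i += 1
--     return parts
-- ===== Notes on version B (the rewrite author's own statement) =====
-- stated objective: faster
-- what changed: Replaced the per-character boolean escape-state scan with a split-and-stitch algorithm: native split on the backslash character first, then each later segment's leading character is the escaped one (an empty segment encoding an escaped backslash) and each unescaped stretch is natively split on the colon character and stitched into the field list.
import Mathlib
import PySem

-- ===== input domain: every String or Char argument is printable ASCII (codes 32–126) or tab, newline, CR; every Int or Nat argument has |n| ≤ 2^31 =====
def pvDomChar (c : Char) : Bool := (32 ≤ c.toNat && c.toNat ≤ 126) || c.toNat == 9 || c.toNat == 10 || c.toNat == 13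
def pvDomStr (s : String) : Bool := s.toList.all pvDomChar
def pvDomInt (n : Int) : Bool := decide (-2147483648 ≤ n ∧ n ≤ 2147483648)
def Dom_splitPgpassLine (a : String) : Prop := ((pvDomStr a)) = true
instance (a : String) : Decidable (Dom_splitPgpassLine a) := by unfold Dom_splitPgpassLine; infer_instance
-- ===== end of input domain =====

-- B replaces A's per-character escape state machine by a split-and-stitch algorithm: native split on
-- the backslash first, then each later segment's leading char is the escaped one and each unescaped
-- stretch splits natively on the colon (same asymptotics; a timing run measured B faster).

-- ===== PORT A =====
-- state (b, escape, d), one fold step per character, exactly as the Python for-loop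
def pvStepA (st : List String × Bool × String) (c : Char) : List String × Bool × String :=
  if !st.2.1 && c == '\\' then (st.1, true, st.2.2)
  else if !st.2.1 && c == ':' then (st.1 ++ [st.2.2], false, "")
  else (st.1, false, st.2.2.push c)

def splitPgpassLine (a : String) : List String :=
  let st := a.toList.foldl pvStepA ([], false, "")
  let d := if st.2.1 then st.2.2.push '\\' else st.2.2
  st.1 ++ [d]

-- ===== PORT B =====
-- parts[-1] += s  (parts is never empty: str.split always returns at least one piece)
def pvMergeLast (parts : List (List Char)) (s : List Char) : List (List Char) :=
  parts.dropLast ++ [parts.getLastD [] ++ s]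

-- the while loop over segs[1:]: an empty segment means the escaped char was a backslash
-- (the next segment is then consumed unescaped), a trailing empty segment a lone final '\';
-- otherwise the segment's first char is the escaped one and its tail splits on ':'
def pvLoopB : List (List Char) → List (List Char) → List (List Char)
  | parts, [] => parts
  | parts, seg :: rest =>
    if seg.isEmpty then
      match rest with
      | nxt :: rest' =>
        let sub := List.splitOn ':' nxt
        pvLoopB (pvMergeLast parts ('\\' :: sub.headD []) ++ sub.tail) rest'
      | [] => pvMergeLast parts ['\\']
    else
      let sub := List.splitOn ':' seg.tail
      pvLoopB (pvMergeLast parts (seg.headD ' ' :: sub.headD []) ++ sub.tail) rest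

def splitPgpassLine_alt (a : String) : List String :=
  let segs := List.splitOn '\\' a.toList
  (pvLoopB (List.splitOn ':' (segs.headD [])) segs.tail).map String.ofList

-- ===== PRECONDITION & SPEC =====
def Spec_splitPgpassLine (a : String) (out : List String) : Prop := out = splitPgpassLine_alt a
instance (a : String) (out : List String) : Decidable (Spec_splitPgpassLine a out) := by unfold Spec_splitPgpassLine; infer_instance

-- ===== CLAIM (what is proved, stated in full; the proofs are below) =====
def Claim_equal_splitPgpassLine : Prop := ∀ (a : String), Dom_splitPgpassLine a → Spec_splitPgpassLine a (splitPgpassLine a)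

-- ===== LEMMAS AND PROOFS =====
def pvFinish (st : List String × Bool × String) : List String :=
  st.1 ++ [if st.2.1 then st.2.2.push '\\' else st.2.2]

-- reference recursion: the field list of the line, escape handled by lookahead
def pvGoB : List Char → List Char → List (List Char)
  | [], d => [d]
  | c :: rest, d =>
    if c == '\\' then
      match rest with
      | [] => [d ++ ['\\']]
      | c2 :: rest' => pvGoB rest' (d ++ [c2])
    else if c == ':' then d :: pvGoB rest []
    else pvGoB rest (d ++ [c])

theorem pvGoB_cons (c : Char) (rest : List Char) (d : List Char) :
    pvGoB (c :: rest) d =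
      if c == '\\' then
        match rest with
        | [] => [d ++ ['\\']]
        | c2 :: rest' => pvGoB rest' (d ++ [c2])
      else if c == ':' then d :: pvGoB rest []
      else pvGoB rest (d ++ [c]) := by
  rw [pvGoB.eq_def]

theorem pvMk_push (d : List Char) (c : Char) : (String.ofList d).push c = String.ofList (d ++ [c]) := by
  apply String.toList_injective
  simp

-- A's fold computes the reference recursion
theorem pvAux (l : List Char) (d : List Char) : ∀ b : List String,
    pvFinish (List.foldl pvStepA (b, false, String.ofList d) l) = b ++ (pvGoB l d).map String.ofList := by
  induction l, d using pvGoB.induct with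
  | case1 d => intro b; simp [pvFinish, pvGoB]
  | case2 c d h =>
    intro b
    have h1 : pvStepA (b, false, String.ofList d) c = (b, true, String.ofList d) := by
      simp [pvStepA, h]
    rw [List.foldl_cons, h1, List.foldl_nil, pvGoB_cons]
    simp [pvFinish, h, pvMk_push]
  | case3 c d h c2 rest' ih =>
    intro b
    have h1 : pvStepA (b, false, String.ofList d) c = (b, true, String.ofList d) := by
      simp [pvStepA, h]
    have h2 : pvStepA (b, true, String.ofList d) c2 = (b, false, String.ofList (d ++ [c2])) := by
      simp [pvStepA, pvMk_push]
    rw [List.foldl_cons, h1, List.foldl_cons, h2, ih, pvGoB_cons]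
    simp [h]
  | case4 c rest d h h2 ih =>
    intro b
    have hstep : pvStepA (b, false, String.ofList d) c = (b ++ [String.ofList d], false, String.ofList []) := by
      simp [pvStepA, h, h2]
    rw [List.foldl_cons, hstep, ih, pvGoB_cons]
    simp [h, h2]
  | case5 c rest d h h2 ih =>
    intro b
    have hstep : pvStepA (b, false, String.ofList d) c = (b, false, String.ofList (d ++ [c])) := by
      simp [pvStepA, h, h2, pvMk_push]
    rw [List.foldl_cons, hstep, ih, pvGoB_cons]
    simp [h, h2]

-- ---- B side ----
-- the characters contributed by segs[1:]: a '\' before each segment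
def pvPre (segs : List (List Char)) : List Char := (segs.map (fun s => '\\' :: s)).flatten

-- continuation after splitting a backslash-free chunk on ':' into pieces u:
-- all pieces but the last are finished fields, the last keeps accumulating into tl
def pvCont (tl : List Char) : List Char → List (List Char) → List (List Char)
  | d, [] => pvGoB tl d
  | d, [h] => pvGoB tl (d ++ h)
  | d, h :: h' :: u => (d ++ h) :: pvCont tl [] (h' :: u)

theorem pvSplitOnP_forall (p : Char → Bool) (cs : List Char) :
    ∀ l ∈ List.splitOnP p cs, ∀ x ∈ l, p x = false := by
  induction cs with
  | nil =>
    intro l hl x hx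
    rw [List.splitOnP_nil] at hl
    simp only [List.mem_singleton] at hl
    subst hl; simp at hx
  | cons c cs ih =>
    intro l hl x hx
    rw [List.splitOnP_cons] at hl
    by_cases hp : p c = true
    · rw [if_pos hp] at hl
      rcases List.mem_cons.mp hl with rfl | hl
      · simp at hx
      · exact ih l hl x hx
    · rw [if_neg hp] at hl
      rcases hu : List.splitOnP p cs with _ | ⟨h, t⟩
      · exact absurd hu (List.splitOnP_ne_nil p cs)
      rw [hu] at hl
      simp only [List.modifyHead] at hl
      rcases List.mem_cons.mp hl with rfl | hl
      · rcases List.mem_cons.mp hx with rfl | hx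
        · simpa using hp
        · exact ih h (hu ▸ List.mem_cons_self) x hx
      · exact ih l (hu ▸ List.mem_cons_of_mem _ hl) x hx

theorem pvSplitOn_bsFree (b : Char) (cs : List Char) :
    ∀ l ∈ List.splitOn b cs, b ∉ l := by
  intro l hl hb
  have := pvSplitOnP_forall (fun x => x == b) cs l (by simpa [List.splitOn] using hl) b hb
  simp at this

-- chunk lemma: pvGoB over a backslash-free chunk is a ':'-split
theorem pvChunk (s : List Char) (hs : '\\' ∉ s) :
    ∀ d tl, pvGoB (s ++ tl) d = pvCont tl d (List.splitOn ':' s) := by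
  induction s with
  | nil => intro d tl; simp [List.splitOn, List.splitOnP_nil, pvCont]
  | cons c s ih =>
    intro d tl
    have hc : c ≠ '\\' := fun h => hs (h ▸ List.mem_cons_self)
    have hs' : '\\' ∉ s := fun h => hs (List.mem_cons_of_mem _ h)
    rcases hu : List.splitOn ':' s with _ | ⟨h, t⟩
    · exact absurd hu (List.splitOnP_ne_nil _ s)
    by_cases hcol : c = ':'
    · subst hcol
      rw [List.cons_append, pvGoB_cons]
      simp only [show (':' == '\\') = false by decide, if_false, beq_self_eq_true, if_true]
      rw [ih hs' [] tl, hu]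
      have hsp : List.splitOnP (fun x => x == ':') s = h :: t := by
        simpa [List.splitOn] using hu
      have : List.splitOn ':' (':' :: s) = [] :: h :: t := by
        simp [List.splitOn, List.splitOnP_cons, hsp]
      rw [this]
      cases t <;> simp [pvCont]
    · rw [List.cons_append, pvGoB_cons]
      have hb : (c == '\\') = false := by simp [hc]
      have hk : (c == ':') = false := by simp [hcol]
      simp only [hb, hk, if_false]
      rw [ih hs' (d ++ [c]) tl, hu]
      have : List.splitOn ':' (c :: s) = (c :: h) :: t := by
        simp only [List.splitOn, List.splitOnP_cons, hk, if_false]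
        have : List.splitOnP (fun x => x == ':') s = h :: t := by simpa [List.splitOn] using hu
        rw [this]; rfl
      rw [this]
      cases t <;> simp [pvCont]

-- pvCont in accumulator form
theorem pvCont_eq (tl : List Char) : ∀ (t : List (List Char)) (d h : List Char),
    pvCont tl d (h :: t) = ((d ++ h) :: t).dropLast ++ pvGoB tl (((d ++ h) :: t).getLastD []) := by
  intro t
  induction t with
  | nil => intro d h; simp [pvCont]
  | cons h' t' ih =>
    intro d h
    rw [show pvCont tl d (h :: h' :: t') = (d ++ h) :: pvCont tl [] (h' :: t') from rfl, ih]
    simp [List.getLastD_cons]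

-- getLastD looks only at the nonempty tail
theorem pvGetLastD_append_cons (p : List (List Char)) (y : List Char) (t : List (List Char)) :
    (p ++ y :: t).getLastD [] = (y :: t).getLastD [] := by
  rw [List.getLastD_eq_getLast?, List.getLastD_eq_getLast?]
  have h : (p ++ y :: t).getLast? = (y :: t).getLast? := by
    simp only [List.getLast?_append]
    exact Option.or_of_isSome (by simp [List.getLast?_isSome])
  rw [h]

theorem pvMergeLast_eq (parts t : List (List Char)) (x : List Char) :
    pvMergeLast parts x ++ t = parts.dropLast ++ ((parts.getLastD [] ++ x) :: t) := by
  simp [pvMergeLast]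

-- the while loop in accumulator form: earlier fields are frozen, the last keeps growing
theorem pvLoopB_eq : ∀ (parts segs : List (List Char)), parts ≠ [] →
    (∀ l ∈ segs, '\\' ∉ l) →
    pvLoopB parts segs = parts.dropLast ++ pvGoB (pvPre segs) (parts.getLastD []) := by
  intro parts segs
  induction parts, segs using pvLoopB.induct with
  | case1 parts =>
    intro hp _
    rcases List.eq_nil_or_concat parts with rfl | ⟨p, y, rfl⟩
    · exact absurd rfl hp
    · simp [pvLoopB, pvGoB, pvPre, List.getLastD_concat]
  | case2 parts seg he nxt rest' sub ih =>
    intro hp hbf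
    have hseg : seg = [] := by simpa [List.isEmpty_iff] using he
    subst hseg
    rcases h0 : List.splitOn ':' nxt with _ | ⟨h, t⟩
    · exact absurd h0 (List.splitOnP_ne_nil _ nxt)
    have hbn : '\\' ∉ nxt := hbf nxt (by simp)
    have hbr : ∀ l ∈ rest', '\\' ∉ l := fun l hl => hbf l (by simp [hl])
    have hsub : sub = h :: t := h0
    rw [show pvLoopB parts ([] :: nxt :: rest') =
      pvLoopB (pvMergeLast parts ('\\' :: sub.headD []) ++ sub.tail) rest' from rfl]
    rw [ih (by simp [pvMergeLast]) hbr]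
    rw [hsub]
    simp only [List.headD_cons, List.tail_cons]
    rw [pvMergeLast_eq]
    rw [List.dropLast_append_of_ne_nil (by simp), pvGetLastD_append_cons, List.append_assoc]
    have hpre : pvPre ([] :: nxt :: rest') = '\\' :: '\\' :: (nxt ++ pvPre rest') := by
      simp [pvPre]
    rw [hpre, pvGoB_cons]
    simp only [beq_self_eq_true, if_true]
    rw [pvChunk nxt hbn, h0, pvCont_eq (pvPre rest') t _ h]
    simp [List.append_assoc]
  | case3 parts seg he =>
    intro hp _
    have hseg : seg = [] := by simpa [List.isEmpty_iff] using he
    subst hseg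
    rw [show pvLoopB parts [[]] = pvMergeLast parts ['\\'] from rfl]
    have hpre : pvPre [[]] = ['\\'] := by simp [pvPre]
    rw [hpre]
    simp [pvMergeLast, pvGoB]
  | case4 parts seg rest he sub ih =>
    intro hp hbf
    rcases seg with _ | ⟨c, s⟩
    · simp at he
    rcases h0 : List.splitOn ':' s with _ | ⟨h, t⟩
    · exact absurd h0 (List.splitOnP_ne_nil _ s)
    have hbs : '\\' ∉ (c :: s) := hbf _ (by simp)
    have hc : c ≠ '\\' := fun hh => hbs (hh ▸ List.mem_cons_self)
    have hbs' : '\\' ∉ s := fun hh => hbs (List.mem_cons_of_mem _ hh)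
    have hbr : ∀ l ∈ rest, '\\' ∉ l := fun l hl => hbf l (by simp [hl])
    have hsub : sub = h :: t := h0
    rw [show pvLoopB parts ((c :: s) :: rest) =
      pvLoopB (pvMergeLast parts ((c :: s).headD ' ' :: sub.headD []) ++ sub.tail) rest by
        rw [pvLoopB.eq_def]; rfl]
    rw [ih (by simp [pvMergeLast]) hbr]
    rw [hsub]
    simp only [List.headD_cons, List.tail_cons]
    rw [pvMergeLast_eq]
    rw [List.dropLast_append_of_ne_nil (by simp), pvGetLastD_append_cons, List.append_assoc]
    have hpre : pvPre ((c :: s) :: rest) = '\\' :: c :: (s ++ pvPre rest) := by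
      simp [pvPre]
    rw [hpre, pvGoB_cons]
    simp only [beq_self_eq_true, if_true]
    rw [pvChunk s hbs', h0, pvCont_eq (pvPre rest) t _ h]
    simp [List.append_assoc]

theorem pvInter : ∀ (rest : List (List Char)) (s0 : List Char),
    ['\\'].intercalate (s0 :: rest) = s0 ++ pvPre rest := by
  intro rest
  induction rest with
  | nil => intro s0; simp [List.intercalate, pvPre]
  | cons s1 rest ih =>
    intro s0
    have step : ['\\'].intercalate (s0 :: s1 :: rest) = s0 ++ '\\' :: ['\\'].intercalate (s1 :: rest) := by
      simp [List.intercalate, List.intersperse]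
    rw [step, ih]
    simp [pvPre]

-- ===== VERDICT (by name: the statement is the Claim_ definition above) =====
theorem splitPgpassLine_spec : Claim_equal_splitPgpassLine := by
  intro a _
  show splitPgpassLine a = splitPgpassLine_alt a
  rcases hsegs : List.splitOn '\\' a.toList with _ | ⟨s0, rest⟩
  · exact absurd hsegs (List.splitOnP_ne_nil _ a.toList)
  have hcs : a.toList = s0 ++ pvPre rest := by
    conv_lhs => rw [← List.intercalate_splitOn a.toList '\\', hsegs]
    exact pvInter rest s0
  have hbf := pvSplitOn_bsFree '\\' a.toList
  rw [hsegs] at hbf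
  have hb0 : '\\' ∉ s0 := hbf s0 (by simp)
  have hbr : ∀ l ∈ rest, '\\' ∉ l := fun l hl => hbf l (by simp [hl])
  rcases h0 : List.splitOn ':' s0 with _ | ⟨h, t⟩
  · exact absurd h0 (List.splitOnP_ne_nil _ s0)
  have hA' : splitPgpassLine a = (pvGoB a.toList []).map String.ofList := by
    simpa [pvFinish, splitPgpassLine] using pvAux a.toList [] []
  have hB' : splitPgpassLine_alt a = (pvLoopB (h :: t) rest).map String.ofList := by
    unfold splitPgpassLine_alt
    rw [hsegs]
    simp only [List.headD_cons, List.tail_cons, h0]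
  have hAgo : pvGoB a.toList [] = (h :: t).dropLast ++ pvGoB (pvPre rest) ((h :: t).getLastD []) := by
    rw [hcs, pvChunk s0 hb0, h0]
    have := pvCont_eq (pvPre rest) t [] h
    simpa using this
  rw [hA', hB', pvLoopB_eq (h :: t) rest (by simp) hbr, hAgo]
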